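-- pv_equiv track=rewrite | github.com/nikoksr/web-monkey | monkeys/urlmonkey.py | get_tree_root
-- ===== SOURCE A (Python) =====
-- def get_tree_root(tree=None):
--     """
--     Returns the root of a tree (main-url of a sub-url)
--     e.g.:   tree: https://www.python.org/about/
--             root: https://www.python.org/
--     """
--     # occurrences of slash ('/')
--     counter = 0
--
--     # iterate through string and return index of third slash
--     for i in range(len(tree)):
--         if (tree[i] == '/'):
--             counter += 1
--             if (counter == 3):
--                 return tree[:i + 1]
--
--     # append a slash if less than three slashes were found
--     return (tree + '/')
-- ===== SOURCE B (Python) =====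
-- def get_tree_root(tree=None):
--     """
--     Returns the root of a tree (main-url of a sub-url)
--     e.g.:   tree: https://www.python.org/about/
--             root: https://www.python.org/
--     """
--     # first three slash-separated tokens rebuilt, with the trailing slash restored
--     parts = tree.split('/')
--     return '/'.join(parts[:3]) + '/'
-- ===== Notes on version B (the rewrite author's own statement) =====
-- stated objective: idiomatic
-- what changed: Replaces the manual index loop with its slash counter and early-return slice by tokenizing with str.split and rebuilding the root from the first three tokens with str.join plus a trailing slash.
import Mathlib
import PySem

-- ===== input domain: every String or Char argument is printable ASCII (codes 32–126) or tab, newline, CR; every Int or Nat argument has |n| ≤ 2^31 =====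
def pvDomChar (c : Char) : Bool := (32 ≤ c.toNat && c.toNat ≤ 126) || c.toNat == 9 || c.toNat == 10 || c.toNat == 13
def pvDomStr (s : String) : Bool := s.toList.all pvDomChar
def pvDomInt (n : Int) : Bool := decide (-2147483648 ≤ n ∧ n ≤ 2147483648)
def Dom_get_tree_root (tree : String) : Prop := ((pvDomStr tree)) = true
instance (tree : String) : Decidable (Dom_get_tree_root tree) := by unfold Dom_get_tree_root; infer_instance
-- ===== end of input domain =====

-- B replaces A's index loop with a split('/')-take-join reconstruction of the URL root (idiomatic; same result on every string).

-- ===== PORT A =====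
-- the 'for i in range(len(tree)): …' loop with its counter and early return
def pvALoop (tree : String) : List Int → Nat → Option String
  | [], _ => none
  | i :: rest, counter =>
    if PySem.Str.pyGet? tree i = some '/' then
      let counter := counter + 1
      if counter = 3 then some (PySem.Str.slice tree none (some (i + 1)))
      else pvALoop tree rest counter
    else pvALoop tree rest counter

def get_tree_root (tree : String) : String :=
  match pvALoop tree (PySem.List.pyRange 0 (PySem.Str.len tree) 1) 0 with
  | some s => s
  | none => tree ++ "/"

-- ===== PORT B =====
def get_tree_root_alt (tree : String) : String :=
  let parts := (PySem.Str.split? tree "/").getD []   -- sep "/" is non-empty, so split? never raises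
  PySem.Str.join "/" (PySem.List.slice parts none (some 3)) ++ "/"

-- ===== PRECONDITION & SPEC =====
def Spec_get_tree_root (tree : String) (out : String) : Prop := out = get_tree_root_alt tree
instance (tree : String) (out : String) : Decidable (Spec_get_tree_root tree out) := by unfold Spec_get_tree_root; infer_instance

-- ===== CLAIM (what is proved, stated in full; the proofs are below) =====
def Claim_equal_get_tree_root : Prop := ∀ (tree : String), Dom_get_tree_root tree → Spec_get_tree_root tree (get_tree_root tree)

-- ===== LEMMAS AND PROOFS =====

-- relative index (in the remaining suffix) of the slash that brings the counter to 3
def aIdx : List Char → Nat → Option Nat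
  | [], _ => none
  | x :: xs, c =>
    if x = '/' then
      if c + 1 = 3 then some 0 else (aIdx xs (c + 1)).map (· + 1)
    else (aIdx xs c).map (· + 1)

-- fuel-free restatement of PySem.Chars.splitOn for the single-character separator '/'
def simpleSplit : List Char → List Char → List (List Char)
  | [], cur => [cur.reverse]
  | x :: xs, cur => if x = '/' then cur.reverse :: simpleSplit xs [] else simpleSplit xs (x :: cur)

lemma go_eq_simpleSplit : ∀ (fuel : Nat) (l cur : List Char) (acc : List (List Char)),
    l.length < fuel →
    PySem.Chars.splitOn.go ['/'] fuel l cur acc = acc.reverse ++ simpleSplit l cur := by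
  intro fuel
  induction fuel with
  | zero => intro l cur acc h; omega
  | succ fuel ih =>
    intro l cur acc h
    cases l with
    | nil => simp [PySem.Chars.splitOn.go, simpleSplit]
    | cons x rest =>
      by_cases hx : x = '/'
      · subst hx
        have : List.isPrefixOf ['/'] ('/' :: rest) = true := by simp [List.isPrefixOf]
        simp only [PySem.Chars.splitOn.go, this]
        rw [ih _ _ _ (by simpa using Nat.lt_of_succ_lt_succ h)]
        simp [simpleSplit]
      · have : List.isPrefixOf ['/'] (x :: rest) = false := by
          simp [List.isPrefixOf]; exact fun hc => hx hc.symm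
        simp only [PySem.Chars.splitOn.go, this]
        rw [if_neg (by simp_all)]
        rw [ih _ _ _ (by simpa using Nat.lt_of_succ_lt_succ h)]
        simp [simpleSplit, hx]

lemma splitOn_eq_simpleSplit (cs : List Char) :
    PySem.Chars.splitOn cs ['/'] = simpleSplit cs [] := by
  unfold PySem.Chars.splitOn
  rw [go_eq_simpleSplit (cs.length + 1) cs [] [] (by omega)]
  simp

lemma simpleSplit_cur : ∀ (l cur : List Char),
    simpleSplit l cur = (cur.reverse ++ (simpleSplit l []).headI) :: (simpleSplit l []).tail := by
  intro l
  induction l with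
  | nil => intro cur; simp [simpleSplit]
  | cons x xs ih =>
    intro cur
    by_cases hx : x = '/'
    · subst hx; simp [simpleSplit]
    · simp only [simpleSplit, if_neg hx]
      rw [ih (x :: cur), ih [x]]
      simp

lemma join_cons_head (x : Char) (p : List Char) (ps : List (List Char)) :
    PySem.Chars.join ['/'] ((x :: p) :: ps) = x :: PySem.Chars.join ['/'] (p :: ps) := by
  cases ps with
  | nil => simp [PySem.Chars.join_singleton]
  | cons q rest => simp [PySem.Chars.join_cons_cons]

lemma main_lemma : ∀ (cs : List Char) (c : Nat), c < 3 →
    PySem.Chars.join ['/'] ((simpleSplit cs []).take (3 - c)) ++ ['/'] =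
      (match aIdx cs c with
       | some i => cs.take (i + 1)
       | none => cs ++ ['/']) := by
  intro cs
  induction cs with
  | nil =>
    intro c hc
    have h1 : 3 - c = (2 - c) + 1 := by omega
    simp [simpleSplit, aIdx, h1, PySem.Chars.join_singleton]
  | cons x xs ih =>
    intro c hc
    have hS : simpleSplit xs [] = (simpleSplit xs []).headI :: (simpleSplit xs []).tail := by
      have := simpleSplit_cur xs []; simpa using this
    by_cases hx : x = '/'
    · subst hx
      by_cases hc3 : c + 1 = 3
      · have h1 : 3 - c = 1 := by omega
        simp [simpleSplit, aIdx, hc3, h1, PySem.Chars.join_singleton]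
      · have hclt : c + 1 < 3 := by omega
        have h1 : 3 - c = (3 - (c + 1)) + 1 := by omega
        have h2 : 3 - (c + 1) = (3 - (c + 1) - 1) + 1 := by omega
        have hsimp : simpleSplit ('/' :: xs) [] = [] :: simpleSplit xs [] := by
          simp [simpleSplit]
        have haidx : aIdx ('/' :: xs) c = (aIdx xs (c + 1)).map (· + 1) := by
          simp [aIdx, hc3]
        have hL : PySem.Chars.join ['/'] ((simpleSplit ('/' :: xs) []).take (3 - c)) ++ ['/'] =
            '/' :: (PySem.Chars.join ['/'] ((simpleSplit xs []).take (3 - (c + 1))) ++ ['/']) := by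
          rw [hsimp, h1, List.take_succ_cons, hS, h2, List.take_succ_cons,
              PySem.Chars.join_cons_cons, ← List.take_succ_cons, ← h2, ← hS]
          simp
        rw [hL, haidx, ih (c + 1) hclt]
        cases hA : aIdx xs (c + 1) with
        | some i => simp [List.take_succ_cons]
        | none => simp
    · have h1 : 3 - c = (3 - c - 1) + 1 := by omega
      have hsimp : simpleSplit (x :: xs) [] =
          (x :: (simpleSplit xs []).headI) :: (simpleSplit xs []).tail := by
        simp only [simpleSplit, if_neg hx]
        rw [simpleSplit_cur xs [x]]
        simp
      have hL : PySem.Chars.join ['/'] ((simpleSplit (x :: xs) []).take (3 - c)) ++ ['/'] =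
          x :: (PySem.Chars.join ['/'] ((simpleSplit xs []).take (3 - c)) ++ ['/']) := by
        rw [hsimp, h1, List.take_succ_cons]
        conv_rhs => rw [hS, h1, List.take_succ_cons]
        rw [join_cons_head]
        simp
      have haidx2 : aIdx (x :: xs) c = (aIdx xs c).map (· + 1) := by
        simp [aIdx, hx]
      rw [hL, haidx2, ih c hc]
      cases hA : aIdx xs c with
      | some i => simp [List.take_succ_cons]
      | none => simp

lemma pvALoop_eq_aIdx (t : String) : ∀ (n k c : Nat), t.toList.length - k ≤ n → c < 3 →
    pvALoop t (PySem.List.pyRange (k : Int) (PySem.Str.len t) 1) c =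
      (aIdx (t.toList.drop k) c).map
        (fun i => PySem.Str.slice t none (some ((k + i + 1 : Nat) : Int))) := by
  intro n
  induction n with
  | zero =>
    intro k c hn hc
    have hk : t.toList.length ≤ k := by omega
    rw [PySem.List.pyRange_one_eq_nil (by rw [PySem.Str.len_eq]; exact_mod_cast hk)]
    rw [List.drop_of_length_le hk]
    simp [pvALoop, aIdx]
  | succ n ih =>
    intro k c hn hc
    by_cases hk : k < t.toList.length
    · rw [PySem.List.pyRange_one_cons (by rw [PySem.Str.len_eq]; exact_mod_cast hk)]
      have hdrop : t.toList.drop k = t.toList[k] :: t.toList.drop (k + 1) :=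
        List.drop_eq_getElem_cons hk
      have hget : PySem.Str.pyGet? t (k : Int) = some t.toList[k] := by
        simp [PySem.Str.pyGet?, PySem.Chars.pyGet?, PySem.List.pyGet?_natCast,
              List.getElem?_eq_getElem hk]
      have hsucc : ((k : Int) + 1) = ((k + 1 : Nat) : Int) := by push_cast; ring
      by_cases hx : t.toList[k] = '/'
      · by_cases hc3 : c + 1 = 3
        · rw [hdrop]
          simp only [pvALoop, hget, hx, aIdx, hc3]
          simp only [reduceIte]
          norm_num
        · simp only [pvALoop, hget, hx, hc3, reduceIte]
          rw [hsucc, ih (k + 1) (c + 1) (by omega) (by omega)]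
          rw [hdrop]
          simp only [aIdx, hx, hc3, reduceIte, Option.map_map]
          cases aIdx (t.toList.drop (k + 1)) (c + 1) with
          | none => simp
          | some i =>
            simp only [Option.map_some, Function.comp]
            rw [show k + 1 + i + 1 = k + (i + 1) + 1 by omega]
      · simp only [pvALoop, hget]
        rw [if_neg (by simpa using hx)]
        rw [hsucc, ih (k + 1) c (by omega) hc]
        rw [hdrop]
        simp only [aIdx, hx, reduceIte, Option.map_map]
        cases aIdx (t.toList.drop (k + 1)) c with
        | none => simp
        | some i =>
          simp only [Option.map_some, Function.comp]
          rw [show k + 1 + i + 1 = k + (i + 1) + 1 by omega]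
    · have hk2 : t.toList.length ≤ k := by omega
      rw [PySem.List.pyRange_one_eq_nil (by rw [PySem.Str.len_eq]; exact_mod_cast hk2)]
      rw [List.drop_of_length_le hk2]
      simp [pvALoop, aIdx]

lemma alt_toList (t : String) :
    (get_tree_root_alt t).toList =
      PySem.Chars.join ['/'] ((simpleSplit t.toList []).take 3) ++ ['/'] := by
  have hsplit : Option.map (fun x => List.map String.toList x) (PySem.Str.split? t "/") =
      PySem.Chars.split? t.toList "/".toList := PySem.Str.split?_map t "/"
  have hsep : "/".toList = ['/'] := by decide
  rw [hsep] at hsplit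
  rw [show PySem.Chars.split? t.toList ['/'] = some (PySem.Chars.splitOn t.toList ['/']) by
        simp [PySem.Chars.split?]] at hsplit
  obtain ⟨ps, hps, hmap⟩ := Option.map_eq_some_iff.mp hsplit
  unfold get_tree_root_alt
  rw [hps]
  simp only [Option.getD_some]
  rw [String.toList_append]
  rw [PySem.List.slice_to ps (by omega)]
  have : (PySem.Str.join "/" (ps.take ((3 : Int).toNat))).toList =
      PySem.Chars.join "/".toList (List.map String.toList (ps.take ((3 : Int).toNat))) :=
    PySem.Str.toList_join "/" _
  rw [this, hsep, List.map_take, hmap, splitOn_eq_simpleSplit]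
  rfl

-- ===== VERDICT (by name: the statement is the Claim_ definition above) =====
theorem get_tree_root_spec : Claim_equal_get_tree_root := by
  intro t _
  unfold Spec_get_tree_root
  rw [← String.toList_inj]
  rw [alt_toList]
  rw [main_lemma t.toList 0 (by omega)]
  unfold get_tree_root
  have h0 : (0 : Int) = ((0 : Nat) : Int) := rfl
  rw [h0, pvALoop_eq_aIdx t t.toList.length 0 0 (by omega) (by omega)]
  simp only [List.drop_zero]
  cases hA : aIdx t.toList 0 with
  | none => simp [String.toList_append]
  | some i =>
    simp only [Option.map_some]
    rw [PySem.Str.toList_slice]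
    unfold PySem.Chars.slice
    rw [PySem.List.slice_to t.toList (by positivity)]
    simp
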